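-- pv_equiv track=rewrite | github.com/Kasiet2001/leetcode | min_additons_to_make_valid_string.py | addMinimum
-- ===== SOURCE A (Python) =====
-- def addMinimum(word):
--     n = len(word)
--     curr = 0
--     ans = 0
--     while curr < n:
--         count = 0
--         if word[curr] == 'a':
--             count += 1
--             curr += 1
--         if curr < n and word[curr] == 'b':
--             count += 1
--             curr += 1
--         if curr < n and word[curr] == 'c':
--             count += 1
--             curr += 1
--         ans += 3 - count
--     return ans
-- ===== SOURCE B (Python) =====
-- def addMinimum(word):
--     if not word:
--         return 0
--     groups = 1 + sum(1 for x, y in zip(word, word[1:]) if y <= x)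
--     return 3 * groups - len(word)
-- ===== Notes on version B (the rewrite author's own statement) =====
-- stated objective: simpler
-- what changed: Replaced the greedy block-simulation while-loop with a closed form: count adjacent non-increasing pairs to get the number of 'abc' groups and return 3*groups - len(word).
import Mathlib
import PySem

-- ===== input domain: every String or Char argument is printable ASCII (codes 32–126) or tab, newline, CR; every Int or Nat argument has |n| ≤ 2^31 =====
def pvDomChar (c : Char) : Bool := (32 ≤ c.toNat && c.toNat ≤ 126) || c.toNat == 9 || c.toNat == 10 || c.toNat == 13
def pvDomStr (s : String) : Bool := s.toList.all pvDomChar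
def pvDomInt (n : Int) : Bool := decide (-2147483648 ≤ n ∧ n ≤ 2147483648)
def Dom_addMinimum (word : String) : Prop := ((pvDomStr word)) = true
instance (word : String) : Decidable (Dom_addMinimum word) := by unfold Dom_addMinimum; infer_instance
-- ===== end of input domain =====

-- B replaces A's greedy block-simulation loop with a closed form (count adjacent
-- non-increasing pairs = number of groups); objective: simpler. A diverges on any
-- character outside {a,b,c}; Pre_ restricts to strings where A terminates.


-- ===== PORT A =====
-- Transliteration of A's while-loop; 'curr' is represented by the remaining suffix of
-- the word ('curr < n' = suffix nonempty, 'word[curr]' = its head). The loop is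
-- fuel-bounded: on Pre_ inputs every iteration consumes at least one character, so
-- fuel |word| + 1 never runs out (outside Pre_ Python's loop diverges; Pre_ excludes that).
def pvLoopA : Nat → List Char → Int → Int
  | 0, _, ans => ans
  | _ + 1, [], ans => ans
  | f + 1, c :: rest, ans =>
    -- count = 0; if word[curr] == 'a': count += 1; curr += 1
    let p1 : Int × List Char := if c = 'a' then (1, rest) else (0, c :: rest)
    -- if curr < n and word[curr] == 'b': count += 1; curr += 1
    let p2 : Int × List Char :=
      match p1.2 with
      | d :: r => if d = 'b' then (p1.1 + 1, r) else p1
      | [] => p1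
    -- if curr < n and word[curr] == 'c': count += 1; curr += 1
    let p3 : Int × List Char :=
      match p2.2 with
      | d :: r => if d = 'c' then (p2.1 + 1, r) else p2
      | [] => p2
    pvLoopA f p3.2 (ans + (3 - p3.1))

def addMinimum (word : String) : Int :=
  pvLoopA (word.toList.length + 1) word.toList 0

-- ===== PORT B =====
-- sum(1 for x, y in zip(word, word[1:]) if y <= x)
def pvDescents (s : List Char) : Int :=
  ((s.zip s.tail).countP (fun p => decide (p.2 ≤ p.1)) : Int)

def addMinimum_alt (word : String) : Int :=
  let s := word.toList
  if s = [] then 0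
  else 3 * (1 + pvDescents s) - s.length

-- ===== PRECONDITION & SPEC =====
-- Pre_ excludes strings containing a character other than 'a','b','c': there A's
-- while-loop never advances curr, so Python A DIVERGES and returns nothing.
def Pre_addMinimum (word : String) : Prop :=
  (word.toList.all (fun c => c == 'a' || c == 'b' || c == 'c')) = true
instance (word : String) : Decidable (Pre_addMinimum word) := by
  unfold Pre_addMinimum; infer_instance
def pvWitness_addMinimum : String := "acb"

def Spec_addMinimum (word : String) (out : Int) : Prop := out = addMinimum_alt word
instance (word : String) (out : Int) : Decidable (Spec_addMinimum word out) := by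
  unfold Spec_addMinimum; infer_instance

-- ===== CLAIM (what is proved, stated in full; the proofs are below) =====
def Claim_equal_addMinimum : Prop :=
  ∀ (word : String), Dom_addMinimum word → Pre_addMinimum word →
    Spec_addMinimum word (addMinimum word)

-- ===== LEMMAS AND PROOFS =====

theorem pvDescents_cons2 (c d : Char) (t : List Char) :
    pvDescents (c :: d :: t) = (if d ≤ c then 1 else 0) + pvDescents (d :: t) := by
  by_cases h : d ≤ c
  · simp [pvDescents, h]
    ring
  · simp [pvDescents, h]

theorem pvDescents_single (c : Char) : pvDescents [c] = 0 := by
  simp [pvDescents]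

theorem pvLe_c (g : Char) (hg : g = 'a' ∨ g = 'b' ∨ g = 'c') : g ≤ 'c' := by
  rcases hg with h | h | h <;> subst h <;> decide

theorem pvLe_b_of_ne (g : Char) (hg : g = 'a' ∨ g = 'b' ∨ g = 'c')
    (h : ¬ g = 'c') : g ≤ 'b' := by
  rcases hg with h' | h' | h' <;> subst h' <;> first | decide | exact absurd rfl h

theorem pvLe_a_of_ne (g : Char) (hg : g = 'a' ∨ g = 'b' ∨ g = 'c')
    (hb : ¬ g = 'b') (hc : ¬ g = 'c') : g ≤ 'a' := by
  rcases hg with h' | h' | h' <;> subst h' <;>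
    first | decide | exact absurd rfl hb | exact absurd rfl hc

-- Main loop invariant: on abc-strings with enough fuel, A's loop computes B's formula.
theorem pvLoopA_eq (f : Nat) :
    ∀ (s : List Char) (ans : Int), s.length ≤ f →
      (∀ c ∈ s, c = 'a' ∨ c = 'b' ∨ c = 'c') →
      pvLoopA (f + 1) s ans =
        ans + (if s = [] then 0 else 3 * (1 + pvDescents s) - s.length) := by
  induction f using Nat.strong_induction_on with
  | _ f IH =>
    intro s ans hlen hs
    match s with
    | [] => cases f <;> simp [pvLoopA]
    | c :: rest =>
      have hc := hs c (by simp)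
      cases f with
      | zero => simp at hlen
      | succ f' =>
      have hIH := IH f' (Nat.lt_succ_self f')
      rcases hc with hc | hc | hc <;> subst hc
      · -- head 'a'
        match rest with
        | [] => simp [pvLoopA, pvDescents_single]
        | d :: r =>
          have hd := hs d (by simp)
          by_cases hdb : d = 'b'
          · subst hdb
            match r with
            | [] =>
              simp [pvLoopA, pvDescents_cons2, pvDescents_single]
            | e :: r2 =>
              have he := hs e (by simp)
              by_cases hec : e = 'c'
              · subst hec
                have step : pvLoopA (f' + 1 + 1) ('a'::'b'::'c'::r2) ans =
                    pvLoopA (f' + 1) r2 (ans + 0) := by simp [pvLoopA]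
                have key := hIH r2 (ans + 0) (by simp at hlen ⊢; omega)
                  (fun x hx => hs x (by simp [hx]))
                rw [step, key]
                match r2 with
                | [] =>
                  simp [pvDescents_cons2, pvDescents_single]
                | g :: t =>
                  have hg := hs g (by simp)
                  rw [if_neg (by simp), if_neg (by simp),
                    pvDescents_cons2, pvDescents_cons2, pvDescents_cons2,
                    if_pos (pvLe_c g hg), if_neg (show ¬ ('b' ≤ 'a') by decide),
                    if_neg (show ¬ ('c' ≤ 'b') by decide)]
                  simp only [List.length_cons]
                  push_cast; ring
              · have step : pvLoopA (f' + 1 + 1) ('a'::'b'::e::r2) ans =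
                    pvLoopA (f' + 1) (e::r2) (ans + 1) := by simp [pvLoopA, hec]
                have key := hIH (e::r2) (ans + 1) (by simp at hlen ⊢; omega)
                  (fun x hx => hs x (by simp [hx]))
                rw [step, key, if_neg (by simp), if_neg (by simp),
                  pvDescents_cons2, pvDescents_cons2,
                  if_pos (pvLe_b_of_ne e he hec),
                  if_neg (show ¬ ('b' ≤ 'a') by decide)]
                simp only [List.length_cons]
                push_cast; ring
          · by_cases hdc : d = 'c'
            · subst hdc
              have step : pvLoopA (f' + 1 + 1) ('a'::'c'::r) ans =
                  pvLoopA (f' + 1) r (ans + 1) := by simp [pvLoopA]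
              have key := hIH r (ans + 1) (by simp at hlen ⊢; omega)
                (fun x hx => hs x (by simp [hx]))
              rw [step, key]
              match r with
              | [] =>
                simp [pvDescents_cons2, pvDescents_single]
              | g :: t =>
                have hg := hs g (by simp)
                rw [if_neg (by simp), if_neg (by simp),
                  pvDescents_cons2, pvDescents_cons2,
                  if_pos (pvLe_c g hg), if_neg (show ¬ ('c' ≤ 'a') by decide)]
                simp only [List.length_cons]
                push_cast; ring
            · -- d = 'a'
              have step : pvLoopA (f' + 1 + 1) ('a'::d::r) ans =
                  pvLoopA (f' + 1) (d::r) (ans + 2) := by simp [pvLoopA, hdb, hdc]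
              have key := hIH (d::r) (ans + 2) (by simp at hlen ⊢; omega)
                (fun x hx => hs x (by simp [hx]))
              rw [step, key, if_neg (by simp), if_neg (by simp),
                pvDescents_cons2, if_pos (pvLe_a_of_ne d hd hdb hdc)]
              simp only [List.length_cons]
              push_cast; ring
      · -- head 'b'
        match rest with
        | [] => simp [pvLoopA, pvDescents_single]
        | d :: r =>
          have hd := hs d (by simp)
          by_cases hdc : d = 'c'
          · subst hdc
            have step : pvLoopA (f' + 1 + 1) ('b'::'c'::r) ans =
                pvLoopA (f' + 1) r (ans + 1) := by simp [pvLoopA]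
            have key := hIH r (ans + 1) (by simp at hlen ⊢; omega)
              (fun x hx => hs x (by simp [hx]))
            rw [step, key]
            match r with
            | [] =>
              simp [pvDescents_cons2, pvDescents_single]
            | g :: t =>
              have hg := hs g (by simp)
              rw [if_neg (by simp), if_neg (by simp),
                pvDescents_cons2, pvDescents_cons2,
                if_pos (pvLe_c g hg), if_neg (show ¬ ('c' ≤ 'b') by decide)]
              simp only [List.length_cons]
              push_cast; ring
          · have step : pvLoopA (f' + 1 + 1) ('b'::d::r) ans =
                pvLoopA (f' + 1) (d::r) (ans + 2) := by simp [pvLoopA, hdc]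
            have key := hIH (d::r) (ans + 2) (by simp at hlen ⊢; omega)
              (fun x hx => hs x (by simp [hx]))
            rw [step, key, if_neg (by simp), if_neg (by simp),
              pvDescents_cons2, if_pos (pvLe_b_of_ne d hd hdc)]
            simp only [List.length_cons]
            push_cast; ring
      · -- head 'c'
        match rest with
        | [] => simp [pvLoopA, pvDescents_single]
        | d :: r =>
          have hd := hs d (by simp)
          have step : pvLoopA (f' + 1 + 1) ('c'::d::r) ans =
              pvLoopA (f' + 1) (d::r) (ans + 2) := by simp [pvLoopA]
          have key := hIH (d::r) (ans + 2) (by simp at hlen ⊢; omega)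
            (fun x hx => hs x (by simp [hx]))
          rw [step, key, if_neg (by simp), if_neg (by simp),
            pvDescents_cons2, if_pos (pvLe_c d hd)]
          simp only [List.length_cons]
          push_cast; ring

-- ===== VERDICT (by name: the statement is the Claim_ definition above) =====
theorem addMinimum_spec : Claim_equal_addMinimum := by
  intro word _ hpre
  have hpre' : ∀ c ∈ word.toList, c = 'a' ∨ c = 'b' ∨ c = 'c' := by
    intro c hc
    have h2 := List.all_eq_true.mp hpre c hc
    simp at h2
    tauto
  unfold Spec_addMinimum addMinimum addMinimum_alt
  rw [pvLoopA_eq word.toList.length word.toList 0 (le_refl _) hpre']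
  by_cases h : word.toList = [] <;> simp [h]
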